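-- pv_equiv track=rewrite | github.com/flogothetis/Technical-Coding-Interviews-Algorithms-LeetCode | Grokking-Coding-Interview-Patterns/16. Knapsack Pattern/targetSum.py | find_target_sum_rec
-- ===== SOURCE A (Python) =====
-- def find_target_sum_rec(array, sum, target_sum, index, memoi):
--     if ((sum, index) in memoi):
--         return memoi[(sum, index)]
--
--     if (sum == target_sum and index <0 ):
--         return 1
--     elif (index < 0 ):
--         return 0
--     memoi[(sum, index)] = find_target_sum_rec(array, sum - array[index], target_sum, index -1, memoi) + \
--            find_target_sum_rec(array, sum + array[index],  target_sum, index -1, memoi)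
--
--     return memoi[(sum, index)]
-- ===== SOURCE B (Python) =====
-- def find_target_sum_rec(array, sum, target_sum, index, memoi):
--     # Iterative bottom-up sweep (return value only; the memo table is read, not
--     # written): dp maps each reachable running sum to the number of sign
--     # assignments producing it, and known subproblem counts from the memo table
--     # are folded into the running total instead of being expanded further.
--     total = 0
--     dp = {sum: 1}
--     for i in range(index, -1, -1):
--         nxt = {}
--         for s, c in dp.items():
--             if (s, i) in memoi:
--                 total += c * memoi[(s, i)]
--             else:
--                 a = array[i]
--                 nxt[s - a] = nxt.get(s - a, 0) + c
--                 nxt[s + a] = nxt.get(s + a, 0) + c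
--         dp = nxt
--     return total + dp.get(target_sum, 0)
-- ===== Notes on version B (the rewrite author's own statement) =====
-- stated objective: alternative
-- what changed: Replaces A's top-down memoized recursion with an iterative bottom-up sweep keeping a dict from reachable running sums to path counts (memo entries are folded into a running total); Pre_ excludes inputs where A raises IndexError (index >= len(array) with no memo hit at the entry key) and memo tables carrying keys with negative index, a degenerate pre-populated cache entry on which trusting the cache (A) or computing the base case (B) are both defensible; return-value equivalence only (A writes subproblem results into memoi, B does not mutate it).
-- outside the precondition, e.g. on find_target_sum_rec([], 0, 0, -1, {(0, -1): 5}): A returns 5, B returns 1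
import Mathlib
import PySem

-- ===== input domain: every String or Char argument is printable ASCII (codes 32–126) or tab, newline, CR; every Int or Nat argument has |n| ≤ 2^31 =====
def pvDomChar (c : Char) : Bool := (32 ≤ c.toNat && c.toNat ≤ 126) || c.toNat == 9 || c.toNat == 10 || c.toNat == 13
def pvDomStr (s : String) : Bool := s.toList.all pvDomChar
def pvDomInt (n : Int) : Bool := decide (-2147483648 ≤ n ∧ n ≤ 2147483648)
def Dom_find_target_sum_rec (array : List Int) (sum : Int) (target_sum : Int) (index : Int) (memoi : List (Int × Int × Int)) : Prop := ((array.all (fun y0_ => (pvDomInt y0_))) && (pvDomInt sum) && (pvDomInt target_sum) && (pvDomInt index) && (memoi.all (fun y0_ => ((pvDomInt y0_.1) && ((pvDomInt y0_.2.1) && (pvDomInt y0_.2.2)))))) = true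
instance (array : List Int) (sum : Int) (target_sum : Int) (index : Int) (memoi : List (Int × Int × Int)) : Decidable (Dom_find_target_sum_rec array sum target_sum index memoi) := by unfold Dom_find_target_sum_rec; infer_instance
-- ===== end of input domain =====

-- B replaces A's top-down memoized recursion by an iterative bottom-up sweep over running sums;
-- equivalence is about the RETURN value only (A writes subproblem results into memoi, B does not mutate it).
-- Both ports use a structural Nat fuel = (index+1).toNat as a totality guard only
-- (the recursion/loop depth of the Python is exactly index+1 levels).

-- first-match association-list lookup for the dict keyed by (sum, index)
def pvLookup : List (Int × Int × Int) → Int → Int → Option Int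
  | [], _, _ => none
  | (s', i', v) :: t, s, i => if s' = s ∧ i' = i then some v else pvLookup t s i

-- ===== PORT A =====
-- A threaded with its memo dict (Python mutates memoi in place); value = .1, memo = .2
def pvRecA (array : List Int) (target_sum : Int) (fuel : Nat) (sum index : Int)
    (m : List (Int × Int × Int)) : Int × List (Int × Int × Int) :=
  match pvLookup m sum index with
  | some v => (v, m)
  | none =>
    if sum = target_sum ∧ index < 0 then (1, m)
    else if index < 0 then (0, m)
    else
      match fuel with
      | 0 => (0, m)        -- unreachable: fuel = (index+1).toNat > 0 when index ≥ 0
      | fuel' + 1 =>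
        let a := (PySem.List.pyGet? array index).getD 0   -- in range under Pre_
        let p1 := pvRecA array target_sum fuel' (sum - a) (index - 1) m
        let p2 := pvRecA array target_sum fuel' (sum + a) (index - 1) p1.2
        (p1.1 + p2.1, p2.2 ++ [(sum, index, p1.1 + p2.1)])

def find_target_sum_rec (array : List Int) (sum : Int) (target_sum : Int) (index : Int) (memoi : List (Int × Int × Int)) : Int :=
  (pvRecA array target_sum (index + 1).toNat sum index memoi).1

-- ===== PORT B =====
-- nxt[k] = nxt.get(k, 0) + c  on the running-sum dict
def pvBump : List (Int × Int) → Int → Int → List (Int × Int)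
  | [], k, c => [(k, c)]
  | (k', v) :: t, k, c => if k' = k then (k', v + c) :: t else (k', v) :: pvBump t k c

-- dp.get(target_sum, 0)
def pvDpGet : List (Int × Int) → Int → Int
  | [], _ => 0
  | (k, v) :: t, key => if k = key then v else pvDpGet t key

-- one level of the sweep: the inner `for s, c in dp.items()` loop; state = (total, nxt)
def pvLevel (array : List Int) (memoi : List (Int × Int × Int)) (i : Int) :
    List (Int × Int) → Int × List (Int × Int) → Int × List (Int × Int)
  | [], acc => acc
  | (s, c) :: rest, (t, nx) =>
    match pvLookup memoi s i with
    | some v => pvLevel array memoi i rest (t + c * v, nx)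
    | none =>
      let a := (PySem.List.pyGet? array i).getD 0
      pvLevel array memoi i rest (t, pvBump (pvBump nx (s - a) c) (s + a) c)

-- the `for i in range(index, -1, -1)` loop, as a fueled count-down; state = (total, dp)
def pvSweepB (array : List Int) (memoi : List (Int × Int × Int)) :
    Nat → Int → Int × List (Int × Int) → Int × List (Int × Int)
  | 0, _, st => st
  | fuel + 1, i, (t, dp) => pvSweepB array memoi fuel (i - 1) (pvLevel array memoi i dp (t, []))

def find_target_sum_rec_alt (array : List Int) (sum : Int) (target_sum : Int) (index : Int) (memoi : List (Int × Int × Int)) : Int :=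
  let r := pvSweepB array memoi (index + 1).toNat index (0, [(sum, 1)])
  r.1 + pvDpGet r.2 target_sum

-- ===== PRECONDITION & SPEC =====
-- Pre_ excludes (a) the inputs where Python A raises IndexError (index ≥ len(array) and no
-- memo hit at the entry key), and (b) memo tables carrying a key with negative index that A
-- would consult (index component -1, or the entry key when index < -1): such a pre-populated
-- cache entry at a degenerate key is a corner on which trusting the cache (A) and computing
-- the base case (B) are both defensible.
def Pre_find_target_sum_rec (array : List Int) (sum : Int) (target_sum : Int) (index : Int) (memoi : List (Int × Int × Int)) : Prop :=
  (index < (array.length : Int) ∨ ∃ e ∈ memoi, e.1 = sum ∧ e.2.1 = index) ∧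
  (-1 ≤ index → ∀ e ∈ memoi, e.2.1 ≠ -1) ∧
  (index < -1 → ∀ e ∈ memoi, ¬ (e.1 = sum ∧ e.2.1 = index))
instance (array : List Int) (sum : Int) (target_sum : Int) (index : Int) (memoi : List (Int × Int × Int)) : Decidable (Pre_find_target_sum_rec array sum target_sum index memoi) := by unfold Pre_find_target_sum_rec; infer_instance

def pvWitness_find_target_sum_rec : List Int × Int × Int × Int × (List (Int × Int × Int)) :=
  ([1, 1], 0, 2, 1, [])

def Spec_find_target_sum_rec (array : List Int) (sum : Int) (target_sum : Int) (index : Int) (memoi : List (Int × Int × Int)) (out : Int) : Prop := out = find_target_sum_rec_alt array sum target_sum index memoi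
instance (array : List Int) (sum : Int) (target_sum : Int) (index : Int) (memoi : List (Int × Int × Int)) (out : Int) : Decidable (Spec_find_target_sum_rec array sum target_sum index memoi out) := by unfold Spec_find_target_sum_rec; infer_instance

-- ===== CLAIM (what is proved, stated in full; the proofs are below) =====
def Claim_equal_find_target_sum_rec : Prop := ∀ (array : List Int) (sum : Int) (target_sum : Int) (index : Int) (memoi : List (Int × Int × Int)), Dom_find_target_sum_rec array sum target_sum index memoi → Pre_find_target_sum_rec array sum target_sum index memoi → Spec_find_target_sum_rec array sum target_sum index memoi (find_target_sum_rec array sum target_sum index memoi)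

-- ===== LEMMAS AND PROOFS =====

-- the mathematical value both programs compute: pure fueled recursion over the ORIGINAL memo
def pvF (array : List Int) (target_sum : Int) (memoi : List (Int × Int × Int))
    (fuel : Nat) (s i : Int) : Int :=
  match pvLookup memoi s i with
  | some v => v
  | none =>
    if i < 0 then (if s = target_sum then 1 else 0)
    else
      match fuel with
      | 0 => 0
      | fuel' + 1 =>
        let a := (PySem.List.pyGet? array i).getD 0
        pvF array target_sum memoi fuel' (s - a) (i - 1) + pvF array target_sum memoi fuel' (s + a) (i - 1)

-- pvF at its canonical fuel (the exact recursion depth)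
def pvFC (array : List Int) (target_sum : Int) (memoi : List (Int × Int × Int)) (s i : Int) : Int :=
  pvF array target_sum memoi (i + 1).toNat s i

lemma pvFC_hit (array : List Int) (target_sum : Int) (memoi : List (Int × Int × Int))
    {s i v : Int} (h : pvLookup memoi s i = some v) :
    pvFC array target_sum memoi s i = v := by
  unfold pvFC; rw [pvF.eq_def, h]

lemma pvFC_base (array : List Int) (target_sum : Int) (memoi : List (Int × Int × Int))
    {s i : Int} (hm : pvLookup memoi s i = none) (hi : i < 0) :
    pvFC array target_sum memoi s i = if s = target_sum then 1 else 0 := by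
  unfold pvFC; rw [pvF.eq_def, hm]; simp [hi]

lemma pvFC_split (array : List Int) (target_sum : Int) (memoi : List (Int × Int × Int))
    {s i : Int} (hm : pvLookup memoi s i = none) (hi : ¬ i < 0) :
    pvFC array target_sum memoi s i
      = pvFC array target_sum memoi (s - (PySem.List.pyGet? array i).getD 0) (i - 1)
        + pvFC array target_sum memoi (s + (PySem.List.pyGet? array i).getD 0) (i - 1) := by
  unfold pvFC
  have h1 : (i + 1).toNat = i.toNat + 1 := by omega
  have h2 : (i - 1 + 1).toNat = i.toNat := by omega
  rw [h1, h2]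
  conv_lhs => rw [pvF.eq_def]
  rw [hm]
  simp [hi]

lemma pvLookup_append_left (l : List (Int × Int × Int)) :
    ∀ (m : List (Int × Int × Int)) {s i v : Int},
    pvLookup m s i = some v → pvLookup (m ++ l) s i = some v := by
  intro m
  induction m with
  | nil => intro s i v h; simp [pvLookup] at h
  | cons e t ih =>
    intro s i v h
    obtain ⟨s', i', w⟩ := e
    simp only [pvLookup, List.cons_append] at h ⊢
    by_cases hc : s' = s ∧ i' = i
    · rw [if_pos hc] at h ⊢; exact h
    · rw [if_neg hc] at h ⊢; exact ih h

lemma pvLookup_append_single :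
    ∀ (m : List (Int × Int × Int)) {vs vi vv s' i' v : Int},
    pvLookup (m ++ [(vs, vi, vv)]) s' i' = some v →
    pvLookup m s' i' = some v ∨ (vs = s' ∧ vi = i' ∧ v = vv) := by
  intro m
  induction m with
  | nil =>
    intro vs vi vv s' i' v h
    simp only [List.nil_append, pvLookup] at h
    by_cases hc : vs = s' ∧ vi = i'
    · rw [if_pos hc] at h
      right; refine ⟨hc.1, hc.2, ?_⟩; injection h with h'; omega
    · rw [if_neg hc] at h; simp at h
  | cons e t ih =>
    intro vs vi vv s' i' v h
    obtain ⟨a, b, c⟩ := e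
    simp only [pvLookup, List.cons_append] at h ⊢
    by_cases hc : a = s' ∧ b = i'
    · rw [if_pos hc] at h ⊢; left; exact h
    · rw [if_neg hc] at h ⊢; exact ih h

lemma pvLookup_eq_none (m : List (Int × Int × Int)) (s i : Int)
    (h : ∀ e ∈ m, ¬ (e.1 = s ∧ e.2.1 = i)) : pvLookup m s i = none := by
  induction m with
  | nil => rfl
  | cons e t ih =>
    obtain ⟨s', i', v⟩ := e
    have hne : ¬ (s' = s ∧ i' = i) := h (s', i', v) (List.mem_cons_self ..)
    simp only [pvLookup, if_neg hne]
    exact ih (fun e he => h e (List.mem_cons_of_mem _ he))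

-- A computes pvFC and only writes pvFC-values into its memo
lemma pvRecA_eq (array : List Int) (target_sum : Int) (memo0 : List (Int × Int × Int)) :
    ∀ (fuel : Nat) (i s : Int) (m : List (Int × Int × Int)),
    (i + 1).toNat ≤ fuel →
    (∀ s' i' v, pvLookup memo0 s' i' = some v → pvLookup m s' i' = some v) →
    (∀ s' i' v, pvLookup m s' i' = some v → v = pvFC array target_sum memo0 s' i') →
    (pvRecA array target_sum fuel s i m).1 = pvFC array target_sum memo0 s i ∧
    (∀ s' i' v, pvLookup memo0 s' i' = some v →
        pvLookup (pvRecA array target_sum fuel s i m).2 s' i' = some v) ∧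
    (∀ s' i' v, pvLookup (pvRecA array target_sum fuel s i m).2 s' i' = some v →
        v = pvFC array target_sum memo0 s' i') := by
  intro fuel
  induction fuel with
  | zero =>
    intro i s m hf h1 h2
    have hi : i < 0 := by omega
    rw [pvRecA]
    cases hm : pvLookup m s i with
    | some v =>
      refine ⟨?_, h1, h2⟩
      show v = pvFC array target_sum memo0 s i
      exact h2 s i v hm
    | none =>
      have hm0 : pvLookup memo0 s i = none := by
        cases h0 : pvLookup memo0 s i with
        | none => rfl
        | some w => rw [h1 s i w h0] at hm; exact absurd hm (by simp)
      by_cases hb : s = target_sum ∧ i < 0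
      · rw [if_pos hb]
        exact ⟨by rw [pvFC_base array target_sum memo0 hm0 hi]; simp [hb.1], h1, h2⟩
      · rw [if_neg hb]
        rw [if_pos hi]
        have hs : ¬ s = target_sum := fun h => hb ⟨h, hi⟩
        exact ⟨by rw [pvFC_base array target_sum memo0 hm0 hi]; simp [hs], h1, h2⟩
  | succ f ih =>
    intro i s m hf h1 h2
    rw [pvRecA]
    cases hm : pvLookup m s i with
    | some v =>
      refine ⟨?_, h1, h2⟩
      show v = pvFC array target_sum memo0 s i
      exact h2 s i v hm
    | none =>
      have hm0 : pvLookup memo0 s i = none := by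
        cases h0 : pvLookup memo0 s i with
        | none => rfl
        | some w => rw [h1 s i w h0] at hm; exact absurd hm (by simp)
      by_cases hb : s = target_sum ∧ i < 0
      · rw [if_pos hb]
        exact ⟨by rw [pvFC_base array target_sum memo0 hm0 hb.2]; simp [hb.1], h1, h2⟩
      · rw [if_neg hb]
        by_cases hi : i < 0
        · rw [if_pos hi]
          have hs : ¬ s = target_sum := fun h => hb ⟨h, hi⟩
          exact ⟨by rw [pvFC_base array target_sum memo0 hm0 hi]; simp [hs], h1, h2⟩
        · rw [if_neg hi]
          simp only
          have hf' : (i - 1 + 1).toNat ≤ f := by omega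
          obtain ⟨e1, j1, k1⟩ := ih (i - 1) (s - (PySem.List.pyGet? array i).getD 0) m hf' h1 h2
          obtain ⟨e2, j2, k2⟩ := ih (i - 1) (s + (PySem.List.pyGet? array i).getD 0)
            (pvRecA array target_sum f (s - (PySem.List.pyGet? array i).getD 0) (i - 1) m).2 hf' j1 k1
          have hval :
              (pvRecA array target_sum f (s - (PySem.List.pyGet? array i).getD 0) (i - 1) m).1
              + (pvRecA array target_sum f (s + (PySem.List.pyGet? array i).getD 0) (i - 1)
                  (pvRecA array target_sum f (s - (PySem.List.pyGet? array i).getD 0) (i - 1) m).2).1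
              = pvFC array target_sum memo0 s i := by
            rw [pvFC_split array target_sum memo0 hm0 hi, e1, e2]
          refine ⟨hval, ?_, ?_⟩
          · intro s' i' v hv
            exact pvLookup_append_left _ _ (j2 s' i' v hv)
          · intro s' i' v hv
            rcases pvLookup_append_single _ hv with h | ⟨hs', hi', hvv⟩
            · exact k2 s' i' v h
            · subst hs'; subst hi'; rw [hvv, ← hval]

-- total weight of a running-sum dict at level i
def pvWeight (array : List Int) (target_sum : Int) (memoi : List (Int × Int × Int))
    (i : Int) (d : List (Int × Int)) : Int :=
  (d.map (fun e => e.2 * pvFC array target_sum memoi e.1 i)).sum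

lemma pvWeight_nil (array : List Int) (target_sum : Int) (memoi : List (Int × Int × Int)) (i : Int) :
    pvWeight array target_sum memoi i [] = 0 := rfl

lemma pvBump_weight (array : List Int) (target_sum : Int) (memoi : List (Int × Int × Int))
    (i : Int) (d : List (Int × Int)) (k c : Int) :
    pvWeight array target_sum memoi i (pvBump d k c)
      = pvWeight array target_sum memoi i d + c * pvFC array target_sum memoi k i := by
  induction d with
  | nil => simp [pvBump, pvWeight]
  | cons e t ih =>
    obtain ⟨k', v⟩ := e
    by_cases h : k' = k
    · subst h; simp [pvBump, pvWeight]; ring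
    · simp only [pvBump, if_neg h]
      simp [pvWeight] at ih ⊢
      rw [ih]; ring

-- keys of the running-sum dict
lemma pvBump_keys (d : List (Int × Int)) (k c : Int) :
    (pvBump d k c).map Prod.fst = d.map Prod.fst ∨
    (pvBump d k c).map Prod.fst = d.map Prod.fst ++ [k] := by
  induction d with
  | nil => right; simp [pvBump]
  | cons e t ih =>
    obtain ⟨k', v⟩ := e
    by_cases h : k' = k
    · left; simp [pvBump, h]
    · simp only [pvBump, if_neg h, List.map_cons]
      rcases ih with ih | ih
      · left; rw [ih]
      · right; rw [ih]; simp

lemma pvBump_nodup (d : List (Int × Int)) (k c : Int)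
    (h : (d.map Prod.fst).Nodup) : ((pvBump d k c).map Prod.fst).Nodup := by
  induction d with
  | nil => simp [pvBump]
  | cons e t ih =>
    obtain ⟨k', v⟩ := e
    simp only [List.map_cons, List.nodup_cons] at h
    by_cases hk : k' = k
    · have hb : pvBump ((k', v) :: t) k c = (k', v + c) :: t := by simp [pvBump, hk]
      rw [hb]; simp only [List.map_cons, List.nodup_cons]; exact h
    · simp only [pvBump, if_neg hk, List.map_cons, List.nodup_cons]
      refine ⟨?_, ih h.2⟩
      rcases pvBump_keys t k c with he | he
      · rw [he]; exact h.1
      · rw [he]; simp only [List.mem_append, List.mem_singleton]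
        rintro (hm | rfl)
        · exact h.1 hm
        · exact hk rfl

lemma pvLevel_nodup (array : List Int) (memoi : List (Int × Int × Int)) (i : Int) :
    ∀ (dp : List (Int × Int)) (t : Int) (nx : List (Int × Int)),
    (nx.map Prod.fst).Nodup → ((pvLevel array memoi i dp (t, nx)).2.map Prod.fst).Nodup := by
  intro dp
  induction dp with
  | nil => intro t nx h; exact h
  | cons e rest ih =>
    intro t nx h
    obtain ⟨s, c⟩ := e
    cases hm : pvLookup memoi s i with
    | some v => simpa [pvLevel, hm] using ih (t + c * v) nx h
    | none =>
      have : pvLevel array memoi i ((s, c) :: rest) (t, nx)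
          = pvLevel array memoi i rest
              (t, pvBump (pvBump nx (s - (PySem.List.pyGet? array i).getD 0) c)
                  (s + (PySem.List.pyGet? array i).getD 0) c) := by
        simp [pvLevel, hm]
      rw [this]
      exact ih _ _ (pvBump_nodup _ _ _ (pvBump_nodup _ _ _ h))

lemma pvSweepB_nodup (array : List Int) (memoi : List (Int × Int × Int)) :
    ∀ (fuel : Nat) (i t : Int) (dp : List (Int × Int)),
    (dp.map Prod.fst).Nodup →
    (((pvSweepB array memoi fuel i (t, dp)).2).map Prod.fst).Nodup := by
  intro fuel
  induction fuel with
  | zero => intro i t dp h; exact h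
  | succ f ih =>
    intro i t dp h
    rw [pvSweepB]
    have hlev := pvLevel_nodup array memoi i dp t [] (by simp)
    have := ih (i - 1) (pvLevel array memoi i dp (t, [])).1 (pvLevel array memoi i dp (t, [])).2 hlev
    simpa using this

lemma pvLevel_spec (array : List Int) (target_sum : Int) (memoi : List (Int × Int × Int))
    {i : Int} (hi : ¬ i < 0) :
    ∀ (dp : List (Int × Int)) (t : Int) (nx : List (Int × Int)),
    (pvLevel array memoi i dp (t, nx)).1
      + pvWeight array target_sum memoi (i - 1) (pvLevel array memoi i dp (t, nx)).2
    = t + pvWeight array target_sum memoi (i - 1) nx + pvWeight array target_sum memoi i dp := by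
  intro dp
  induction dp with
  | nil => intro t nx; simp [pvLevel, pvWeight]
  | cons e rest ih =>
    intro t nx
    obtain ⟨s, c⟩ := e
    cases hm : pvLookup memoi s i with
    | some v =>
      have h1 : pvLevel array memoi i ((s, c) :: rest) (t, nx)
          = pvLevel array memoi i rest (t + c * v, nx) := by
        simp [pvLevel, hm]
      have hv : pvFC array target_sum memoi s i = v := pvFC_hit _ _ _ hm
      rw [h1, ih]
      simp [pvWeight, hv]; ring
    | none =>
      have h1 : pvLevel array memoi i ((s, c) :: rest) (t, nx)
          = pvLevel array memoi i rest
              (t, pvBump (pvBump nx (s - (PySem.List.pyGet? array i).getD 0) c)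
                  (s + (PySem.List.pyGet? array i).getD 0) c) := by
        simp [pvLevel, hm]
      have hsplit := pvFC_split array target_sum memoi hm hi
      rw [h1, ih, pvBump_weight, pvBump_weight]
      simp [pvWeight, hsplit]; ring

lemma pvSweepB_spec (array : List Int) (target_sum : Int) (memoi : List (Int × Int × Int)) :
    ∀ (fuel : Nat) (i t : Int) (dp : List (Int × Int)),
    (0 < fuel → (fuel : Int) ≤ i + 1) →
    (pvSweepB array memoi fuel i (t, dp)).1
      + pvWeight array target_sum memoi (i - fuel) (pvSweepB array memoi fuel i (t, dp)).2
    = t + pvWeight array target_sum memoi i dp := by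
  intro fuel
  induction fuel with
  | zero => intro i t dp _; simp [pvSweepB]
  | succ f ih =>
    intro i t dp hf
    have hi : ¬ i < 0 := by have := hf (by omega); omega
    rw [pvSweepB]
    have hrec : (pvSweepB array memoi f (i - 1) (pvLevel array memoi i dp (t, []))).1
        + pvWeight array target_sum memoi ((i - 1) - f)
            (pvSweepB array memoi f (i - 1) (pvLevel array memoi i dp (t, []))).2
      = (pvLevel array memoi i dp (t, [])).1
        + pvWeight array target_sum memoi (i - 1) (pvLevel array memoi i dp (t, [])).2 := by
      have := ih (i - 1) (pvLevel array memoi i dp (t, [])).1 (pvLevel array memoi i dp (t, [])).2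
        (by intro h0; have := hf (by omega); omega)
      simpa using this
    have hlev := pvLevel_spec array target_sum memoi hi dp t []
    rw [pvWeight_nil] at hlev
    have harith : (i - 1 : Int) - (f : Int) = i - ((f : Int) + 1) := by ring
    rw [harith] at hrec
    push_cast
    omega

-- a dict with nodup keys, all memo-free at a negative level: weight = .get(target_sum, 0)
lemma pvWeight_zero_of_not_mem (array : List Int) (target_sum : Int) (memoi : List (Int × Int × Int))
    {i : Int} (hi : i < 0) :
    ∀ (dp : List (Int × Int)),
    (∀ e ∈ dp, pvLookup memoi e.1 i = none) →
    target_sum ∉ dp.map Prod.fst →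
    pvWeight array target_sum memoi i dp = 0 := by
  intro dp
  induction dp with
  | nil => intro _ _; rfl
  | cons e rest ih =>
    intro hm ht
    obtain ⟨s, c⟩ := e
    simp only [List.map_cons, List.mem_cons] at ht
    have hs : ¬ s = target_sum := fun h => ht (Or.inl h.symm)
    have hb := pvFC_base array target_sum memoi (hm (s, c) (List.mem_cons_self ..)) hi
    rw [if_neg hs] at hb
    have := ih (fun e he => hm e (List.mem_cons_of_mem _ he)) (fun h => ht (Or.inr h))
    simp [pvWeight, hb] at this ⊢
    exact this

lemma pvWeight_neg_eq_get (array : List Int) (target_sum : Int) (memoi : List (Int × Int × Int))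
    {i : Int} (hi : i < 0) :
    ∀ (dp : List (Int × Int)),
    (∀ e ∈ dp, pvLookup memoi e.1 i = none) →
    (dp.map Prod.fst).Nodup →
    pvWeight array target_sum memoi i dp = pvDpGet dp target_sum := by
  intro dp
  induction dp with
  | nil => intro _ _; rfl
  | cons e rest ih =>
    intro hm hnd
    obtain ⟨s, c⟩ := e
    simp only [List.map_cons, List.nodup_cons] at hnd
    have hb := pvFC_base array target_sum memoi (hm (s, c) (List.mem_cons_self ..)) hi
    have hrestm : ∀ e ∈ rest, pvLookup memoi e.1 i = none :=
      fun e he => hm e (List.mem_cons_of_mem _ he)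
    by_cases hs : s = target_sum
    · subst hs
      have h0 := pvWeight_zero_of_not_mem array s memoi hi rest hrestm hnd.1
      simp [pvWeight, pvDpGet, hb] at h0 ⊢
      exact h0
    · have := ih hrestm hnd.2
      rw [if_neg hs] at hb
      simp [pvWeight, pvDpGet, hb, hs] at this ⊢
      exact this

-- ===== VERDICT (by name: the statement is the Claim_ definition above) =====
theorem find_target_sum_rec_spec : Claim_equal_find_target_sum_rec := by
  intro array sum target_sum index memoi _ hpre
  obtain ⟨-, hneg1, hdeep⟩ := hpre
  unfold Spec_find_target_sum_rec find_target_sum_rec find_target_sum_rec_alt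
  obtain ⟨hA, -, -⟩ := pvRecA_eq array target_sum memoi (index + 1).toNat index sum memoi
    (by omega) (fun _ _ _ h => h)
    (fun s' i' v h => (pvFC_hit array target_sum memoi h).symm)
  rw [hA]
  show pvFC array target_sum memoi sum index
    = (pvSweepB array memoi (index + 1).toNat index (0, [(sum, 1)])).1
      + pvDpGet (pvSweepB array memoi (index + 1).toNat index (0, [(sum, 1)])).2 target_sum
  have hsweep := pvSweepB_spec array target_sum memoi (index + 1).toNat index 0 [(sum, 1)]
    (by intro h0; omega)
  have hnd := pvSweepB_nodup array memoi (index + 1).toNat index 0 [(sum, 1)] (by simp)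
  by_cases hidx : -1 ≤ index
  · -- final level is -1; Pre_ says the memo has no key with index component -1
    have hlvl : index - ((index + 1).toNat : Int) = -1 := by omega
    rw [hlvl] at hsweep
    have hnone : ∀ e ∈ (pvSweepB array memoi (index + 1).toNat index (0, [(sum, 1)])).2,
        pvLookup memoi e.1 (-1) = none := by
      intro e _
      exact pvLookup_eq_none memoi e.1 (-1) (fun m hm h => hneg1 hidx m hm h.2)
    rw [pvWeight_neg_eq_get array target_sum memoi (by omega) _ hnone hnd] at hsweep
    have hstart : pvWeight array target_sum memoi index [(sum, 1)]
        = pvFC array target_sum memoi sum index := by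
      simp [pvWeight]
    rw [hstart] at hsweep
    omega
  · -- index < -1: the fuel is 0, the sweep returns its initial state unchanged
    have h0 : (index + 1).toNat = 0 := by omega
    rw [h0] at hsweep hnd ⊢
    have hlvl : index - ((0 : Nat) : Int) = index := by simp
    rw [hlvl] at hsweep
    have hnone : ∀ e ∈ (pvSweepB array memoi 0 index (0, [(sum, 1)])).2,
        pvLookup memoi e.1 index = none := by
      intro e he
      have hdp : (pvSweepB array memoi 0 index (0, [(sum, 1)])).2 = [(sum, 1)] := rfl
      rw [hdp, List.mem_singleton] at he
      subst he
      exact pvLookup_eq_none memoi sum index (hdeep (by omega))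
    rw [pvWeight_neg_eq_get array target_sum memoi (by omega) _ hnone hnd] at hsweep
    have hstart : pvWeight array target_sum memoi index [(sum, 1)]
        = pvFC array target_sum memoi sum index := by
      simp [pvWeight]
    rw [hstart] at hsweep
    omega
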